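-- pv_equiv track=rewrite | github.com/astropy/astropy-healpix | playground/healpix_py.py | decode_id
-- ===== SOURCE A (Python) =====
-- def decode_id(id: int) -> (int, int):
--     assert id <= 0x7fffffff
--     order = 0
--     l = (id >> 2) + 1
--     while l >= 4:
--         l >>= 2
--         order += 1
--
--     index = id - (((1 << (2 * order)) - 1) << 2)
--     return order, index
-- ===== SOURCE B (Python) =====
-- def decode_id(id: int) -> (int, int):
--     assert id <= 0x7fffffff
--     l = (id >> 2) + 1
--     order = (l.bit_length() - 1) // 2 if l > 0 else 0
--     index = id - (((1 << (2 * order)) - 1) << 2)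
--     return order, index
-- ===== Notes on version B (the rewrite author's own statement) =====
-- stated objective: simpler
-- what changed: The divide-by-4 while loop counting the order is replaced by a closed-form computation from the bit length of the shifted id.
import Mathlib
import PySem

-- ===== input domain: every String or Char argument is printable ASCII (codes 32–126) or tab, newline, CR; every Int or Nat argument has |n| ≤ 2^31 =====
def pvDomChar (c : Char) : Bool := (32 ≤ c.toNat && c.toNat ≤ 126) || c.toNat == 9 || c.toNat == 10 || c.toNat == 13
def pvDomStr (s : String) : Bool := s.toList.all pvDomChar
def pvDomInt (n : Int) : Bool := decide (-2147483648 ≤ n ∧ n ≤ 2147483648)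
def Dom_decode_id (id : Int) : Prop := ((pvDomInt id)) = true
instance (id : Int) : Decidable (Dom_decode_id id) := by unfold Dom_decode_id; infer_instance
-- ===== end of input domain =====

-- B replaces A's divide-by-4 while loop with a closed-form bit_length computation of the order (simpler).


-- termination helper for the port of A's while loop
lemma shiftRight_toNat_lt (l : Int) (h : 4 ≤ l) : (l >>> (2:Nat)).toNat < l.toNat := by
  rcases l with m | m
  · have h4 : 4 ≤ m := by simpa using h
    show ((((m >>> 2 : Nat)) : Int)).toNat < (Int.ofNat m).toNat
    simp [Nat.shiftRight_eq_div_pow]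
    omega
  · exact absurd h (by omega)

-- ===== PORT A =====
-- the 'while l >= 4: l >>= 2; order += 1' loop, step for step
def decodeLoop (l : Int) (order : Int) : Int :=
  if 4 ≤ l then decodeLoop (l >>> (2:Nat)) (order + 1) else order
termination_by l.toNat
decreasing_by exact shiftRight_toNat_lt l ‹_›

def decode_id (id : Int) : Int × Int :=
  let l := (id >>> (2:Nat)) + 1
  let order := decodeLoop l 0
  let index := id - ((((1 : Int) <<< (2 * order).toNat) - 1) <<< (2:Nat))
  (order, index)

-- ===== PORT B =====
def decode_id_alt (id : Int) : Int × Int :=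
  let l := (id >>> (2:Nat)) + 1
  let order := if 0 < l then PySem.Int.floordiv ((PySem.Int.bitLength l : Int) - 1) 2 else 0
  let index := id - ((((1 : Int) <<< (2 * order).toNat) - 1) <<< (2:Nat))
  (order, index)

-- ===== PRECONDITION & SPEC =====
-- A's 'assert id <= 0x7fffffff' raises AssertionError above this bound (B asserts the same).
def Pre_decode_id (id : Int) : Prop := id ≤ 0x7fffffff
instance (id : Int) : Decidable (Pre_decode_id id) := by unfold Pre_decode_id; infer_instance
def pvWitness_decode_id : Int := 1000

def Spec_decode_id (id : Int) (out : Int × Int) : Prop := out = decode_id_alt id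
instance (id : Int) (out : Int × Int) : Decidable (Spec_decode_id id out) := by unfold Spec_decode_id; infer_instance

-- ===== CLAIM (what is proved, stated in full; the proofs are below) =====
def Claim_equal_decode_id : Prop := ∀ (id : Int), Dom_decode_id id → Pre_decode_id id → Spec_decode_id id (decode_id id)

-- ===== LEMMAS AND PROOFS =====

lemma bitLength_ge_three {n : Nat} (h : 4 ≤ n) : 3 ≤ PySem.Int.bitLength (n : Int) := by
  by_contra hlt
  have := PySem.Int.lt_two_pow_bitLength (n : Int)
  interval_cases h' : PySem.Int.bitLength (n : Int) <;> simp_all <;> omega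

lemma bitLength_ge_one {n : Nat} (h : 1 ≤ n) : 1 ≤ PySem.Int.bitLength (n : Int) := by
  by_contra hlt
  have := PySem.Int.lt_two_pow_bitLength (n : Int)
  interval_cases h' : PySem.Int.bitLength (n : Int) <;> simp_all

lemma natCast_shiftRight_two (n : Nat) : (n : Int) >>> (2:Nat) = ((n >>> 2 : Nat) : Int) := rfl

lemma decodeLoop_eq (n : Nat) (hn : 1 ≤ n) :
    ∀ o : Int, decodeLoop (n : Int) o = o + (((PySem.Int.bitLength (n : Int) - 1) / 2 : Nat) : Int) := by
  induction n using Nat.strong_induction_on with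
  | _ n ih =>
    intro o
    by_cases h4 : 4 ≤ n
    · rw [decodeLoop, if_pos (by exact_mod_cast h4), natCast_shiftRight_two]
      have hsh : n >>> 2 = n / 4 := by simp [Nat.shiftRight_eq_div_pow]
      rw [hsh, ih (n / 4) (by omega) (by omega)]
      have hb1 := PySem.Int.bitLength_natCast (m := n) (by omega)
      have hb2 := PySem.Int.bitLength_natCast (m := n / 2) (by omega)
      have hdd : n / 2 / 2 = n / 4 := by omega
      rw [hdd] at hb2
      have h3 := bitLength_ge_three h4
      omega
    · rw [decodeLoop, if_neg (by exact_mod_cast h4)]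
      interval_cases n <;> simp

-- ===== VERDICT (by name: the statement is the Claim_ definition above) =====
theorem decode_id_spec : Claim_equal_decode_id := by
  intro id _ _
  show decode_id id = decode_id_alt id
  simp only [decode_id, decode_id_alt]
  by_cases hl : (0:Int) < (id >>> (2:Nat)) + 1
  · rw [if_pos hl]
    have hcast : (id >>> (2:Nat)) + 1 = ((((id >>> (2:Nat)) + 1).toNat : Nat) : Int) := by omega
    have h1 : 1 ≤ ((id >>> (2:Nat)) + 1).toNat := by omega
    have hbl := bitLength_ge_one h1
    have hfd : PySem.Int.floordiv
        ((PySem.Int.bitLength ((id >>> (2:Nat)) + 1) : Int) - 1) 2 =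
        (((PySem.Int.bitLength (((((id >>> (2:Nat)) + 1).toNat : Nat)) : Int) - 1) / 2 : Nat) : Int) := by
      rw [hcast]
      have heq : ((PySem.Int.bitLength ((((id >>> (2:Nat)) + 1).toNat : Nat) : Int) : Int) - 1) =
          (((PySem.Int.bitLength ((((id >>> (2:Nat)) + 1).toNat : Nat) : Int) - 1 : Nat)) : Int) := by
        omega
      rw [heq]
      exact_mod_cast PySem.Int.floordiv_natCast _ 2
    rw [hfd, hcast, decodeLoop_eq _ h1 0, zero_add]
    simp
  · rw [if_neg hl, decodeLoop, if_neg (by omega)]
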